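-- pv_equiv track=rewrite | github.com/savirsingh/keysmash-detector | detector.py | check_keyboard_smash
-- ===== SOURCE A (Python) =====
-- import math
--
-- keyboard_layout = {
--     'q': (0, 0), 'w': (0, 1), 'e': (0, 2), 'r': (0, 3), 't': (0, 4), 'y': (0, 5), 'u': (0, 6), 'i': (0, 7), 'o': (0, 8), 'p': (0, 9),
--     'a': (1, 0), 's': (1, 1), 'd': (1, 2), 'f': (1, 3), 'g': (1, 4), 'h': (1, 5), 'j': (1, 6), 'k': (1, 7), 'l': (1, 8),
--     'z': (2, 0), 'x': (2, 1), 'c': (2, 2), 'v': (2, 3), 'b': (2, 4), 'n': (2, 5), 'm': (2, 6)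
-- }
--
-- def distance_between_keys(key1, key2):
--     if key1 in keyboard_layout and key2 in keyboard_layout:
--         row1, col1 = keyboard_layout[key1]
--         row2, col2 = keyboard_layout[key2]
--         # Calculate Euclidean distance between two keys
--         distance = math.sqrt((row2 - row1)**2 + (col2 - col1)**2)
--         return distance
--     else:
--         return None
--
-- def check_keyboard_smash(key_sequence):
--     max_segment_distance = 4  # Adjust as needed based on sensitivity
--     segment_length = 4  # Adjust as needed based on the segment length to check
--     tot = 0
--
--     for i in range(len(key_sequence) - segment_length + 1):
--         segment = key_sequence[i:i + segment_length]
--         segment_distances = []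
--
--         # Calculate distances between consecutive keys in the segment
--         for j in range(len(segment) - 1):
--             key1 = segment[j]
--             key2 = segment[j + 1]
--             distance = distance_between_keys(key1, key2)
--             if distance is not None:
--                 segment_distances.append(distance)
--
--         # Check if all distances in the segment are within max_segment_distance
--         if all(distance <= max_segment_distance for distance in segment_distances):
--             tot += 1
--
--     return tot > 3
-- ===== SOURCE B (Python) =====
-- keyboard_layout = {
--     'q': (0, 0), 'w': (0, 1), 'e': (0, 2), 'r': (0, 3), 't': (0, 4), 'y': (0, 5), 'u': (0, 6), 'i': (0, 7), 'o': (0, 8), 'p': (0, 9),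
--     'a': (1, 0), 's': (1, 1), 'd': (1, 2), 'f': (1, 3), 'g': (1, 4), 'h': (1, 5), 'j': (1, 6), 'k': (1, 7), 'l': (1, 8),
--     'z': (2, 0), 'x': (2, 1), 'c': (2, 2), 'v': (2, 3), 'b': (2, 4), 'n': (2, 5), 'm': (2, 6)
-- }
--
-- def check_keyboard_smash(key_sequence):
--     # Single streak pass: a window of 4 keys passes iff its 3 consecutive pairs
--     # are all "good" (a pair is bad only when both keys are on the keyboard and
--     # their squared distance exceeds 16 -- exact integer form of sqrt(...) > 4).
--     # Maintain the length `run` of the current streak of good pairs; each pair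
--     # that brings the streak to >= 3 completes exactly one passing window.
--     passing = 0
--     run = 0
--     for a, b in zip(key_sequence, key_sequence[1:]):
--         p = keyboard_layout.get(a)
--         q = keyboard_layout.get(b)
--         if p is not None and q is not None and (p[0] - q[0]) ** 2 + (p[1] - q[1]) ** 2 > 16:
--             run = 0
--         else:
--             run += 1
--             if run >= 3:
--                 passing += 1
--     return passing > 3
-- ===== Notes on version B (the rewrite author's own statement) =====
-- stated objective: alternative
-- what changed: Instead of slicing every 4-character window and recomputing float key distances inside each one, B makes a single pass over adjacent pairs maintaining the run length of consecutive good pairs (exact integer squared-distance test instead of sqrt), counting one passing window each time the run reaches 3.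
import Mathlib
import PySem

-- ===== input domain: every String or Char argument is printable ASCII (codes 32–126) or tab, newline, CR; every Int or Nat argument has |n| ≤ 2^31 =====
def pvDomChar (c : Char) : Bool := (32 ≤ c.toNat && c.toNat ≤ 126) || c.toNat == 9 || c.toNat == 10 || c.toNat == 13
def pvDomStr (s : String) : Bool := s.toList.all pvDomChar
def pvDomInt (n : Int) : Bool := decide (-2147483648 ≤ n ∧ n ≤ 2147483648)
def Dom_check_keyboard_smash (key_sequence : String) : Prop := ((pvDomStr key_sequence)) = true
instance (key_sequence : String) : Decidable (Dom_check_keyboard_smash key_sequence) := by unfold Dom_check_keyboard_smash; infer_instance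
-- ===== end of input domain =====

-- B replaces A's slice-every-window rescanning by one streak pass over adjacent key pairs:
-- it keeps the run length of consecutive good pairs and counts a window whenever the run
-- reaches 3 (objective: alternative decomposition; each pair distance computed once).
-- A's float comparison `sqrt(d2) <= 4` is ported exactly as the integer comparison `d2 <= 16`
-- (coordinates are integers and sqrt is strictly monotone, so the two tests agree everywhere).
-- B's nonnegative counters are ported as Nat, exact since they only ever increase from 0.


-- ===== PORT A =====
def kbLayout : PySem.Dict Char (Int × Int) :=
  PySem.Dict.ofList
    [('q', (0, 0)), ('w', (0, 1)), ('e', (0, 2)), ('r', (0, 3)), ('t', (0, 4)),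
     ('y', (0, 5)), ('u', (0, 6)), ('i', (0, 7)), ('o', (0, 8)), ('p', (0, 9)),
     ('a', (1, 0)), ('s', (1, 1)), ('d', (1, 2)), ('f', (1, 3)), ('g', (1, 4)),
     ('h', (1, 5)), ('j', (1, 6)), ('k', (1, 7)), ('l', (1, 8)),
     ('z', (2, 0)), ('x', (2, 1)), ('c', (2, 2)), ('v', (2, 3)), ('b', (2, 4)),
     ('n', (2, 5)), ('m', (2, 6))]

-- Python returns math.sqrt of this integer; the only use A makes of it is the comparison
-- `distance <= 4`, ported exactly as `squared <= 16` (integer coordinates, sqrt monotone).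
def distance_between_keys (key1 key2 : Char) : Option Int :=
  match kbLayout.get? key1, kbLayout.get? key2 with
  | some (row1, col1), some (row2, col2) =>
      some ((row2 - row1) ^ 2 + (col2 - col1) ^ 2)
  | _, _ => none

def check_keyboard_smash (key_sequence : String) : Bool :=
  let cs := key_sequence.toList
  let tot : Int :=
    (PySem.List.pyRange 0 ((cs.length : Int) - 4 + 1) 1).foldl
      (fun tot i =>
        let segment := PySem.List.slice cs (some i) (some (i + 4))
        let segment_distances : List Int :=
          (PySem.List.pyRange 0 ((segment.length : Int) - 1) 1).foldl
            (fun acc j =>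
              let key1 := PySem.List.pyGetD segment j ' '
              let key2 := PySem.List.pyGetD segment (j + 1) ' '
              match distance_between_keys key1 key2 with
              | some distance => acc ++ [distance]
              | none => acc) []
        if segment_distances.all (fun distance => decide (distance ≤ 16)) then tot + 1 else tot)
      0
  decide (tot > 3)

-- ===== PORT B =====
-- B's per-pair test: bad iff both keys on the keyboard and squared distance > 16
def badPair (a b : Char) : Bool :=
  match kbLayout.get? a, kbLayout.get? b with
  | some p, some q => decide ((p.1 - q.1) ^ 2 + (p.2 - q.2) ^ 2 > 16)
  | _, _ => false

-- B's loop: walk the string once, state = (run of good pairs, passing windows)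
def smashLoop : List Char → Nat → Nat → Nat
  | a :: b :: rest, run, passing =>
      if badPair a b then smashLoop (b :: rest) 0 passing
      else
        let run' := run + 1
        smashLoop (b :: rest) run' (if 3 ≤ run' then passing + 1 else passing)
  | _, _, passing => passing

def check_keyboard_smash_alt (key_sequence : String) : Bool :=
  decide (3 < smashLoop key_sequence.toList 0 0)

-- ===== PRECONDITION & SPEC =====
def Spec_check_keyboard_smash (key_sequence : String) (out : Bool) : Prop := out = check_keyboard_smash_alt key_sequence
instance (key_sequence : String) (out : Bool) : Decidable (Spec_check_keyboard_smash key_sequence out) := by unfold Spec_check_keyboard_smash; infer_instance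

-- ===== CLAIM (what is proved, stated in full; the proofs are below) =====
def Claim_equal_check_keyboard_smash : Prop := ∀ (key_sequence : String), Dom_check_keyboard_smash key_sequence → Spec_check_keyboard_smash key_sequence (check_keyboard_smash key_sequence)

-- ===== LEMMAS AND PROOFS =====

-- A's per-window check, as a function of the 4-character segment
def gseg (segment : List Char) : Bool :=
  ((PySem.List.pyRange 0 ((segment.length : Int) - 1) 1).foldl
    (fun acc j =>
      match distance_between_keys (PySem.List.pyGetD segment j ' ')
            (PySem.List.pyGetD segment (j + 1) ' ') with
      | some distance => acc ++ [distance]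
      | none => acc) ([] : List Int)).all (fun distance => decide (distance ≤ 16))

-- the pairwise bad table, and the window count over it
def badList (cs : List Char) : List Bool := List.zipWith badPair cs cs.tail

def countOk : List Bool → Nat
  | x :: y :: z :: rest => (if !x && !y && !z then 1 else 0) + countOk (y :: z :: rest)
  | _ => 0

-- the streak count over the bad table (abstract form of smashLoop)
def cnt : List Bool → Nat → Nat
  | x :: rest, run =>
      if x then cnt rest 0
      else (if 3 ≤ run + 1 then 1 else 0) + cnt rest (run + 1)
  | [], _ => 0

lemma badPair_eq (a b : Char) :
    badPair a b = (match distance_between_keys a b with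
                   | some d => decide (16 < d)
                   | none => false) := by
  unfold badPair distance_between_keys
  rcases kbLayout.get? a with _ | ⟨r1, c1⟩
  all_goals (rcases kbLayout.get? b with _ | ⟨r2, c2⟩; all_goals simp)
  have h1 : (r1 - r2) ^ 2 = (r2 - r1) ^ 2 := by ring
  have h2 : (c1 - c2) ^ 2 = (c2 - c1) ^ 2 := by ring
  rw [h1, h2]

lemma dle (x : Int) : decide (x ≤ 16) = !decide (16 < x) := by
  by_cases h : x ≤ 16 <;> simp [h] <;> omega

lemma gseg_quad (a b c d : Char) :
    gseg [a, b, c, d] = (!badPair a b && !badPair b c && !badPair c d) := by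
  unfold gseg
  rw [badPair_eq, badPair_eq, badPair_eq]
  rw [show PySem.List.pyRange 0 ((([a,b,c,d] : List Char).length : Int) - 1) 1 = [0, 1, 2] from by
    norm_num; decide]
  simp only [List.foldl]
  rw [show PySem.List.pyGetD [a,b,c,d] 0 ' ' = a from rfl,
      show PySem.List.pyGetD [a,b,c,d] (0+1) ' ' = b from rfl,
      show PySem.List.pyGetD [a,b,c,d] 1 ' ' = b from rfl,
      show PySem.List.pyGetD [a,b,c,d] (1+1) ' ' = c from rfl,
      show PySem.List.pyGetD [a,b,c,d] 2 ' ' = c from rfl,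
      show PySem.List.pyGetD [a,b,c,d] (2+1) ' ' = d from rfl]
  rcases distance_between_keys a b with _ | x <;>
    rcases distance_between_keys b c with _ | y <;>
      rcases distance_between_keys c d with _ | z <;>
        simp [List.all_cons, dle, Bool.and_assoc]

lemma count_windows (cs : List Char) :
    (List.range (((cs.length : Int) - 4 + 1).toNat)).countP
      (fun k => gseg ((cs.drop k).take 4)) = countOk (badList cs) := by
  induction cs with
  | nil => rfl
  | cons a cs ih =>
    rcases cs with _ | ⟨b, _ | ⟨c, _ | ⟨d, r⟩⟩⟩
    · rfl
    · rfl
    · rfl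
    · have hlen : ((((a :: b :: c :: d :: r).length : Int) - 4 + 1).toNat) = r.length + 1 := by
        simp; omega
      have hlen' : ((((b :: c :: d :: r).length : Int) - 4 + 1).toNat) = r.length := by
        simp; omega
      rw [hlen, List.range_succ_eq_map, List.countP_cons, List.countP_map]
      have hstep : ((fun k => gseg (((a :: b :: c :: d :: r).drop k).take 4)) ∘ Nat.succ)
          = fun k => gseg (((b :: c :: d :: r).drop k).take 4) := rfl
      rw [hstep]
      have hih := ih
      rw [hlen'] at hih
      rw [hih]
      rw [show List.take 4 (List.drop 0 (a :: b :: c :: d :: r)) = [a, b, c, d] from rfl, gseg_quad]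
      show countOk (badPair b c :: badPair c d :: List.zipWith badPair (d :: r) r) + _
        = countOk (badPair a b :: badPair b c :: badPair c d :: List.zipWith badPair (d :: r) r)
      rw [show countOk (badPair a b :: badPair b c :: badPair c d :: List.zipWith badPair (d :: r) r)
            = (if !badPair a b && !badPair b c && !badPair c d then 1 else 0)
              + countOk (badPair b c :: badPair c d :: List.zipWith badPair (d :: r) r) from rfl]
      exact Nat.add_comm _ _

-- padding of ≤2 good pairs before a bad pair contributes no window
lemma countOk_true (rest : List Bool) : countOk (true :: rest) = countOk rest := by
  rcases rest with _ | ⟨y, _ | ⟨z, r⟩⟩ <;> simp [countOk]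

lemma countOk_false_true (rest : List Bool) :
    countOk (false :: true :: rest) = countOk rest := by
  rcases rest with _ | ⟨y, r⟩ <;> simp [countOk, countOk_true]

lemma countOk_false_false_true (rest : List Bool) :
    countOk (false :: false :: true :: rest) = countOk rest := by
  simp [countOk, countOk_false_true]

-- a streak of length min run 2 of good pairs already behind us is what `run` records
lemma cnt_eq_countOk (bs : List Bool) :
    ∀ run : Nat, cnt bs run = countOk (List.replicate (min run 2) false ++ bs) := by
  induction bs with
  | nil =>
    intro run
    rcases run with _ | _ | run
    · rfl
    · rfl
    · rw [show min (run + 1 + 1) 2 = 2 from by omega]; rfl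
  | cons x rest ih =>
    intro run
    cases hx : x with
    | true =>
      show cnt rest 0 = _
      rw [ih 0]
      rcases run with _ | _ | run
      · simpa using (countOk_true rest).symm
      · simpa [List.replicate] using (countOk_false_true rest).symm
      · rw [show min (run + 1 + 1) 2 = 2 from by omega]
        simpa [List.replicate] using (countOk_false_false_true rest).symm
    | false =>
      show (if 3 ≤ run + 1 then 1 else 0) + cnt rest (run + 1) = _
      rw [ih (run + 1)]
      rcases run with _ | _ | run
      · simp [List.replicate]
      · simp
      · rw [show min (run + 1 + 1) 2 = 2 from by omega,
            show min (run + 1 + 1 + 1) 2 = 2 from by omega,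
            if_pos (by omega)]
        show 1 + countOk (false :: false :: rest) = countOk (false :: false :: false :: rest)
        rw [show countOk (false :: false :: false :: rest)
              = (if !false && !false && !false then 1 else 0)
                + countOk (false :: false :: rest) from rfl]
        simp [Nat.add_comm]

lemma smashLoop_eq (cs : List Char) :
    ∀ run passing : Nat, smashLoop cs run passing = passing + cnt (badList cs) run := by
  induction cs with
  | nil => intro run passing; rfl
  | cons a cs ih =>
    intro run passing
    rcases cs with _ | ⟨b, rest⟩
    · rfl
    · show (if badPair a b then smashLoop (b :: rest) 0 passing
            else smashLoop (b :: rest) (run + 1)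
              (if 3 ≤ run + 1 then passing + 1 else passing))
        = passing + cnt (badPair a b :: badList (b :: rest)) run
      cases hb : badPair a b with
      | true => simp [cnt, ih]
      | false =>
        simp only [Bool.false_eq_true, if_false, ih, cnt]
        split <;> omega

-- ===== VERDICT (by name: the statement is the Claim_ definition above) =====
theorem check_keyboard_smash_spec : Claim_equal_check_keyboard_smash := by
  intro s _hdom
  unfold Spec_check_keyboard_smash
  show decide (((PySem.List.pyRange 0 ((s.toList.length : Int) - 4 + 1) 1).foldl
      (fun tot i => if gseg (PySem.List.slice s.toList (some i) (some (i + 4)))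
                    then tot + 1 else tot) (0 : Int)) > 3)
    = decide (3 < smashLoop s.toList 0 0)
  rw [PySem.List.foldl_count_if, smashLoop_eq, cnt_eq_countOk]
  rw [PySem.List.pyRange_one, List.countP_map]
  have hfun : ((fun i => gseg (PySem.List.slice s.toList (some i) (some (i + 4))))
        ∘ fun k : Nat => (0 : Int) + ↑k)
      = fun k : Nat => gseg ((s.toList.drop k).take 4) := by
    funext k
    simp only [Function.comp_apply, zero_add]
    rw [show ((k : Int) + 4) = ((k : Int) + ((4 : Nat) : Int)) from by norm_num]
    rw [PySem.List.slice_natCast_add]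
  rw [hfun, show ((s.toList.length : Int) - 4 + 1 - 0) = ((s.toList.length : Int) - 4 + 1) from by ring]
  rw [count_windows]
  simp
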